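-- pv_equiv track=rewrite | github.com/mehtabhaumik/Predicta | backend/astro_api/safety_audit.py | classify_report_kind
-- ===== SOURCE A (Python) =====
-- from typing import Iterable, List, Optional
--
-- def classify_report_kind(categories: List[str]) -> Optional[str]:
--     if any(category in {"self-harm", "illicit-violent", "sexual-minors", "input-length"} for category in categories):
--         return "BLOCKED"
--     if any(
--         category
--         in {
--             "fatalistic-certainty",
--             "professional-certainty",
--             "unsafe-instructions",
--             "fake-nadi-claim",
--         }
--         for category in categories
--     ):
--         return "OUTPUT_REWRITTEN"
--     if any(category.startswith("high-stakes:") for category in categories):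
--         return "HIGH_STAKES"
--     if "low-confidence" in categories:
--         return "LOW_CONFIDENCE"
--     return None
-- ===== SOURCE B (Python) =====
-- from typing import List, Optional
--
-- _LABELS = ("BLOCKED", "OUTPUT_REWRITTEN", "HIGH_STAKES", "LOW_CONFIDENCE")
--
-- def classify_report_kind(categories: List[str]) -> Optional[str]:
--     best = None
--     for category in categories:
--         if category in {"self-harm", "illicit-violent", "sexual-minors", "input-length"}:
--             rank = 0
--         elif category in {"fatalistic-certainty", "professional-certainty", "unsafe-instructions", "fake-nadi-claim"}:
--             rank = 1
--         elif category.startswith("high-stakes:"):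
--             rank = 2
--         elif category == "low-confidence":
--             rank = 3
--         else:
--             continue
--         if best is None or rank < best:
--             best = rank
--     return None if best is None else _LABELS[best]
-- ===== Notes on version B (the rewrite author's own statement) =====
-- stated objective: alternative
-- what changed: Replaces A's four sequential early-return scans over the list with a single pass that accumulates the minimum priority rank seen and maps the best rank to its label at the end.
import Mathlib
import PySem

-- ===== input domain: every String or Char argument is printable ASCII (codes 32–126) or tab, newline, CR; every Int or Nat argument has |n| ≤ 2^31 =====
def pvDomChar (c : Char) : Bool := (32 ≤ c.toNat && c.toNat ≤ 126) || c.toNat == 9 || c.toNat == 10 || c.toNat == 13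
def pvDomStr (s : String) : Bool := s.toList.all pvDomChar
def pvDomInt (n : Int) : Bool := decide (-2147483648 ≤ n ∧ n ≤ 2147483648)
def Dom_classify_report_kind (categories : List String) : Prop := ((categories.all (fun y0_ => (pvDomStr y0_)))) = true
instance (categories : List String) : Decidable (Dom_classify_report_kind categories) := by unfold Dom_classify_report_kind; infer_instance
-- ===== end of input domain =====

-- B rewrites A's four sequential early-return scans as a single pass accumulating the minimum priority rank (alternative decomposition; same cost).

-- ===== PORT A =====
def classify_report_kind (categories : List String) : Option String :=
  if categories.any (fun category => ["self-harm", "illicit-violent", "sexual-minors", "input-length"].contains category) then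
    some "BLOCKED"
  else if categories.any (fun category => ["fatalistic-certainty", "professional-certainty", "unsafe-instructions", "fake-nadi-claim"].contains category) then
    some "OUTPUT_REWRITTEN"
  else if categories.any (fun category => PySem.Str.startswith category "high-stakes:") then
    some "HIGH_STAKES"
  else if categories.contains "low-confidence" then
    some "LOW_CONFIDENCE"
  else
    none

-- ===== PORT B =====
-- one loop step of Source B: compute the rank of `category` (or skip), then min-update `best`
def pvStep (best : Option Nat) (category : String) : Option Nat :=
  if ["self-harm", "illicit-violent", "sexual-minors", "input-length"].contains category then
    match best with | none => some 0 | some m => if 0 < m then some 0 else best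
  else if ["fatalistic-certainty", "professional-certainty", "unsafe-instructions", "fake-nadi-claim"].contains category then
    match best with | none => some 1 | some m => if 1 < m then some 1 else best
  else if PySem.Str.startswith category "high-stakes:" then
    match best with | none => some 2 | some m => if 2 < m then some 2 else best
  else if category = "low-confidence" then
    match best with | none => some 3 | some m => if 3 < m then some 3 else best
  else
    best

def classify_report_kind_alt (categories : List String) : Option String :=
  match categories.foldl pvStep none with
  | none => none
  | some 0 => some "BLOCKED"
  | some 1 => some "OUTPUT_REWRITTEN"
  | some 2 => some "HIGH_STAKES"
  | some 3 => some "LOW_CONFIDENCE"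
  | some _ => none  -- unreachable: ranks are 0..3

-- ===== PRECONDITION & SPEC =====
def Spec_classify_report_kind (categories : List String) (out : Option String) : Prop := out = classify_report_kind_alt categories
instance (categories : List String) (out : Option String) : Decidable (Spec_classify_report_kind categories out) := by unfold Spec_classify_report_kind; infer_instance

-- ===== CLAIM (what is proved, stated in full; the proofs are below) =====
def Claim_equal_classify_report_kind : Prop := ∀ (categories : List String), Dom_classify_report_kind categories → Spec_classify_report_kind categories (classify_report_kind categories)

-- ===== LEMMAS AND PROOFS =====

-- the four per-element tests, shared by the lemmas
def pvP0 (c : String) : Bool := ["self-harm", "illicit-violent", "sexual-minors", "input-length"].contains c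
def pvP1 (c : String) : Bool := ["fatalistic-certainty", "professional-certainty", "unsafe-instructions", "fake-nadi-claim"].contains c
def pvP2 (c : String) : Bool := PySem.Str.startswith c "high-stakes:"
def pvP3 (c : String) : Bool := c = "low-confidence"

-- minimum of the ranks occurring in the list, as a closed characterisation
def pvBestSpec (l : List String) : Option Nat :=
  if l.any (fun c => pvP0 c) then some 0
  else if l.any (fun c => pvP1 c) then some 1
  else if l.any (fun c => pvP2 c) then some 2
  else if l.any (fun c => pvP3 c) then some 3
  else none

theorem pvStep_eq (b : Option Nat) (c : String) :
    pvStep b c = (pvBestSpec [c]).elim b (fun k => match b with | none => some k | some m => some (min k m)) := by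
  simp only [pvStep, pvBestSpec, pvP0, pvP1, pvP2, pvP3, List.any_cons, List.any_nil, Bool.or_false]
  split_ifs <;> rcases b with _ | m <;>
    simp [Option.elim, Nat.min_def] <;> (try split_ifs) <;> first | rfl | omega | (simp_all <;> omega)

theorem pvFoldl_merge (l : List String) (b : Option Nat) :
    l.foldl pvStep b = (pvBestSpec l).elim b (fun k => match b with | none => some k | some m => some (min k m)) := by
  induction l generalizing b with
  | nil => simp [pvBestSpec, Option.elim]
  | cons c l ih =>
    rw [List.foldl_cons, ih, pvStep_eq]
    simp only [pvBestSpec, List.any_cons, List.any_nil, Bool.or_false]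
    by_cases h0 : pvP0 c <;> by_cases h1 : pvP1 c <;> by_cases h2 : pvP2 c <;> by_cases h3 : pvP3 c <;>
      simp only [h0, h1, h2, h3, Bool.true_or, Bool.false_or, if_true] <;>
      split_ifs <;> rcases b with _ | m <;>
        simp [Option.elim, Nat.min_def] <;> (try split_ifs) <;> first | rfl | omega | simp_all

theorem classify_report_kind_eq_alt (categories : List String) :
    classify_report_kind categories = classify_report_kind_alt categories := by
  unfold classify_report_kind classify_report_kind_alt
  rw [pvFoldl_merge categories none]
  unfold pvBestSpec
  simp only [pvP0, pvP1, pvP2, pvP3]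
  have hc : categories.contains "low-confidence" = categories.any (fun c => decide (c = "low-confidence")) := by
    induction categories with
    | nil => rfl
    | cons a l ih => simp [List.any_eq, eq_comm]
  rw [hc]
  split_ifs <;> rfl

-- ===== VERDICT (by name: the statement is the Claim_ definition above) =====
theorem classify_report_kind_spec : Claim_equal_classify_report_kind := by
  intro categories _
  unfold Spec_classify_report_kind
  exact classify_report_kind_eq_alt categories
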